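-- pv_equiv track=rewrite | github.com/awaisajaz1/earthquake-airflow-pipeline | langchain_app/llm_handler.py | _extract_sql_from_response
-- ===== SOURCE A (Python) =====
-- def _extract_sql_from_response(response: str) -> str:
--     """Extract SQL query from LLM response"""
--     # Remove common prefixes and suffixes
--     response = response.strip()
--
--     # Look for SQL query patterns
--     lines = response.split('\n')
--     sql_lines = []
--
--     for line in lines:
--         line = line.strip()
--         if not line:
--             continue
--
--         # Skip explanatory text
--         if line.lower().startswith(('here', 'the sql', 'query:', 'answer:')):
--             continue
--
--         # Look for SQL keywords
--         if any(keyword in line.upper() for keyword in ['SELECT', 'INSERT', 'UPDATE', 'DELETE', 'WITH']):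
--             sql_lines.append(line)
--         elif sql_lines:  # Continue collecting if we've started
--             sql_lines.append(line)
--
--     if sql_lines:
--         sql_query = ' '.join(sql_lines)
--         # Clean up the query
--         sql_query = sql_query.replace('```sql', '').replace('```', '').strip()
--         return sql_query
--
--     # Fallback: return the whole response if no SQL pattern found
--     return response.replace('```sql', '').replace('```', '').strip()
-- ===== SOURCE B (Python) =====
-- def _extract_sql_from_response(response: str) -> str:
--     """Extract SQL query from LLM response"""
--     response = response.strip()
--
--     # Pass 1: cleaned lines = stripped, non-empty, not explanatory text
--     cleaned = [
--         line for line in (raw.strip() for raw in response.split('\n'))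
--         if line and not line.lower().startswith(('here', 'the sql', 'query:', 'answer:'))
--     ]
--
--     # Pass 2: index of the first line containing an SQL keyword
--     keywords = ('SELECT', 'INSERT', 'UPDATE', 'DELETE', 'WITH')
--     start = next((i for i, line in enumerate(cleaned)
--                   if any(k in line.upper() for k in keywords)), None)
--
--     if start is None:
--         # Fallback: no SQL pattern found
--         return response.replace('```sql', '').replace('```', '').strip()
--     return ' '.join(cleaned[start:]).replace('```sql', '').replace('```', '').strip()
-- ===== Notes on version B (the rewrite author's own statement) =====
-- stated objective: idiomatic
-- what changed: Replaced A's single stateful loop (accumulator whose emptiness decides whether non-keyword lines are kept) by a filter-then-find-index decomposition: build the cleaned line list once, locate the first keyword line, and take the suffix slice.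
import Mathlib
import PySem

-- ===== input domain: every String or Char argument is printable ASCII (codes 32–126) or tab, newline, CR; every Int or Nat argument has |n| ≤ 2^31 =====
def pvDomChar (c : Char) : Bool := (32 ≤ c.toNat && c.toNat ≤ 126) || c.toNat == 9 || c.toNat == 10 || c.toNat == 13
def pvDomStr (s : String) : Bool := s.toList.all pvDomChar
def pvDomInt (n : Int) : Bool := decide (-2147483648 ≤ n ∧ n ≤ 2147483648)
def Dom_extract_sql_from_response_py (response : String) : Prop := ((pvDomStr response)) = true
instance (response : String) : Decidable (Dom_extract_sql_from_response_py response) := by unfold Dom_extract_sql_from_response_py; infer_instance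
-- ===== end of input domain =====

-- B replaces A's stateful accumulator loop by a filter-then-find-index decomposition (idiomatic; same cost).

-- shared literal constants of both Python programs
def sqlStopPrefixes : List String := ["here", "the sql", "query:", "answer:"]
def sqlKeywords : List String := ["SELECT", "INSERT", "UPDATE", "DELETE", "WITH"]
-- line.lower().startswith(('here', 'the sql', 'query:', 'answer:'))
def isSkipLine (line : String) : Bool :=
  sqlStopPrefixes.any (fun p => PySem.Str.startswith (PySem.Str.lower line) p)
-- any(keyword in line.upper() for keyword in [...])
def hasSqlKw (line : String) : Bool :=
  sqlKeywords.any (fun k => PySem.Str.isIn k (PySem.Str.upper line))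

-- ===== PORT A =====
-- one iteration of A's 'for line in lines' loop, state = sql_lines
def extractStepA (sql_lines : List String) (rawLine : String) : List String :=
  let line := PySem.Str.strip rawLine
  if line = "" then sql_lines
  else if isSkipLine line then sql_lines
  else if hasSqlKw line then sql_lines ++ [line]
  else if !sql_lines.isEmpty then sql_lines ++ [line]
  else sql_lines

def extract_sql_from_response_py (response : String) : String :=
  let r := PySem.Str.strip response
  let lines := (PySem.Str.split? r "\n").getD []   -- sep = "\n" ≠ "", so split? is exact (never none)
  let sql_lines := lines.foldl extractStepA []
  if !sql_lines.isEmpty then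
    PySem.Str.strip (PySem.Str.replace (PySem.Str.replace (PySem.Str.join " " sql_lines) "```sql" "") "```" "")
  else
    PySem.Str.strip (PySem.Str.replace (PySem.Str.replace r "```sql" "") "```" "")

-- ===== PORT B =====
def extract_sql_from_response_py_alt (response : String) : String :=
  let r := PySem.Str.strip response
  let cleaned := (((PySem.Str.split? r "\n").getD []).map PySem.Str.strip).filter
      (fun line => line ≠ "" && !isSkipLine line)
  match cleaned.findIdx? hasSqlKw with   -- next((i for i, line in enumerate(cleaned) if ...), None)
  | none => PySem.Str.strip (PySem.Str.replace (PySem.Str.replace r "```sql" "") "```" "")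
  | some i =>
    PySem.Str.strip (PySem.Str.replace (PySem.Str.replace (PySem.Str.join " " (cleaned.drop i)) "```sql" "") "```" "")

-- ===== PRECONDITION & SPEC =====
def Spec_extract_sql_from_response_py (response : String) (out : String) : Prop := out = extract_sql_from_response_py_alt response
instance (response : String) (out : String) : Decidable (Spec_extract_sql_from_response_py response out) := by unfold Spec_extract_sql_from_response_py; infer_instance

-- ===== CLAIM (what is proved, stated in full; the proofs are below) =====
def Claim_equal_extract_sql_from_response_py : Prop := ∀ (response : String), Dom_extract_sql_from_response_py response → Spec_extract_sql_from_response_py response (extract_sql_from_response_py response)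

-- ===== LEMMAS AND PROOFS =====

-- the cleaned line list B builds
def cleanedOf (lines : List String) : List String :=
  (lines.map PySem.Str.strip).filter (fun line => line ≠ "" && !isSkipLine line)

-- once sql_lines is non-empty, A's loop appends every cleaned line
lemma foldl_stepA_ne_nil (lines : List String) (acc : List String) (h : acc ≠ []) :
    lines.foldl extractStepA acc = acc ++ cleanedOf lines := by
  induction lines generalizing acc with
  | nil => simp [cleanedOf]
  | cons l rest ih =>
    simp only [List.foldl_cons, cleanedOf, List.map_cons, List.filter_cons]
    by_cases h1 : PySem.Str.strip l = ""
    · simpa [extractStepA, h1, cleanedOf] using ih acc h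
    · by_cases h2 : isSkipLine (PySem.Str.strip l)
      · simpa [extractStepA, h1, h2, cleanedOf] using ih acc h
      · have hne : acc ++ [PySem.Str.strip l] ≠ [] := by simp
        by_cases h3 : hasSqlKw (PySem.Str.strip l) <;>
          simp [extractStepA, h1, h2, h3, h, cleanedOf,
                ih (acc ++ [PySem.Str.strip l]) hne]

-- from the empty accumulator, A's loop computes the suffix of cleaned lines from the first keyword line
lemma foldl_stepA_nil (lines : List String) :
    lines.foldl extractStepA [] = (cleanedOf lines).dropWhile (fun l => !hasSqlKw l) := by
  induction lines with
  | nil => simp [cleanedOf]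
  | cons l rest ih =>
    simp only [List.foldl_cons, cleanedOf, List.map_cons, List.filter_cons]
    by_cases h1 : PySem.Str.strip l = ""
    · simpa [extractStepA, h1, cleanedOf] using ih
    · by_cases h2 : isSkipLine (PySem.Str.strip l)
      · simpa [extractStepA, h1, h2, cleanedOf] using ih
      · by_cases h3 : hasSqlKw (PySem.Str.strip l)
        · simp [extractStepA, h1, h2, h3,
                foldl_stepA_ne_nil rest [PySem.Str.strip l] (by simp), cleanedOf]
        · simpa [extractStepA, h1, h2, h3, List.dropWhile_cons, cleanedOf] using ih

-- B's find-index-then-slice equals dropWhile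
lemma findIdx?_drop_eq_dropWhile {α : Type} (p : α → Bool) (xs : List α) :
    (match xs.findIdx? p with
     | none => ([] : List α)
     | some i => xs.drop i) = xs.dropWhile (fun x => !p x) := by
  induction xs with
  | nil => simp
  | cons x rest ih =>
    by_cases h : p x
    · simp [List.findIdx?_cons, h]
    · rw [List.findIdx?_cons, if_neg (by simpa using h), List.dropWhile_cons]
      cases hf : rest.findIdx? p with
      | none => simp only [hf] at ih ⊢; simpa [h] using ih
      | some i => simp only [hf] at ih ⊢; simpa [h] using ih

-- ===== VERDICT (by name: the statement is the Claim_ definition above) =====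
theorem extract_sql_from_response_py_spec : Claim_equal_extract_sql_from_response_py := by
  intro response _
  unfold Spec_extract_sql_from_response_py extract_sql_from_response_py extract_sql_from_response_py_alt
  simp only [foldl_stepA_nil]
  rw [show (((PySem.Str.split? (PySem.Str.strip response) "\n").getD []).map PySem.Str.strip).filter
        (fun line => line ≠ "" && !isSkipLine line)
      = cleanedOf ((PySem.Str.split? (PySem.Str.strip response) "\n").getD []) from rfl]
  set cs := cleanedOf ((PySem.Str.split? (PySem.Str.strip response) "\n").getD []) with hcs
  rw [← findIdx?_drop_eq_dropWhile hasSqlKw cs]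
  cases hf : cs.findIdx? hasSqlKw with
  | none => simp
  | some i =>
    have hi : i < cs.length := (List.findIdx?_eq_some_iff_findIdx_eq.mp hf).1
    have : ¬ (cs.drop i).isEmpty := by
      simp [List.isEmpty_iff, List.drop_eq_nil_iff]; omega
    simp [this]
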